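-- pv_equiv track=rewrite | github.com/dome0luis0valentin/Tecnicas_de_resolucion_de_problemas | P1/Hartal.py | calcular_dias_con_paro
-- ===== SOURCE A (Python) =====
-- def calcular_dias_con_paro(semanas, dias):
--     dias = 0
--     cant_semanas = int(len(semanas)/7)
--     for I in range(cant_semanas):
--         for J in range(5):
--             if ( semanas[I*7+J]== True):
--                 dias = dias + 1
--     return dias
-- ===== SOURCE B (Python) =====
-- def calcular_dias_con_paro(semanas, dias):
--     # single flat pass: count weekday (position-in-week < 5) strikes within complete weeks
--     limit = (len(semanas) // 7) * 7
--     count = 0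
--     for idx, v in enumerate(semanas):
--         if idx < limit and idx % 7 < 5 and v == True:
--             count += 1
--     return count
-- ===== Notes on version B (the rewrite author's own statement) =====
-- stated objective: simpler
-- what changed: Replaced the nested weeks x days index loops with one flat enumerate pass over the list, counting positions idx < (len//7)*7 with idx % 7 < 5 that hold True.
import Mathlib
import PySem

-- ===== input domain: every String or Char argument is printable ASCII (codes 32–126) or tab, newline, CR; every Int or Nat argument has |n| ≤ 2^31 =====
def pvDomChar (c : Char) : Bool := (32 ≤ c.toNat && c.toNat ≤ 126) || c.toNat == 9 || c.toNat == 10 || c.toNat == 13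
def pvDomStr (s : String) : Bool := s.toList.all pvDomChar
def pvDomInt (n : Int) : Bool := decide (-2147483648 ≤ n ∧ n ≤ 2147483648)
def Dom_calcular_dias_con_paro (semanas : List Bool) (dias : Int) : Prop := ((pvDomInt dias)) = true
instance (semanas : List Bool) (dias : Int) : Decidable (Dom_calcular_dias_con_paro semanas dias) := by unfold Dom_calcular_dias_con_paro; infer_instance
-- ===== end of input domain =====

-- B replaces A's nested weeks×days index loops by one flat enumerate pass; same cost, simpler shape.

-- ===== PORT A =====
-- int(len(semanas)/7) is the floor len//7 on this domain; the indices I*7+J are always in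
-- range, so pyGetD is exact here (Python's indexing never reaches the IndexError case).
def calcular_dias_con_paro (semanas : List Bool) (_dias : Int) : Int :=
  let dias : Int := 0
  let cant_semanas : Int := PySem.Int.floordiv (semanas.length : Int) 7
  (PySem.List.pyRange 0 cant_semanas).foldl (fun dias I =>
    (PySem.List.pyRange 0 5).foldl (fun dias J =>
      if PySem.List.pyGetD semanas (I * 7 + J) false = true then dias + 1 else dias) dias) dias

-- ===== PORT B =====
def calcular_dias_con_paro_alt (semanas : List Bool) (_dias : Int) : Int :=
  let limit : Int := PySem.Int.floordiv (semanas.length : Int) 7 * 7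
  (PySem.List.enumerate semanas).foldl (fun count p =>
    if p.1 < limit ∧ PySem.Int.mod p.1 7 < 5 ∧ p.2 = true then count + 1 else count) 0

-- ===== PRECONDITION & SPEC =====
def Spec_calcular_dias_con_paro (semanas : List Bool) (dias : Int) (out : Int) : Prop := out = calcular_dias_con_paro_alt semanas dias
instance (semanas : List Bool) (dias : Int) (out : Int) : Decidable (Spec_calcular_dias_con_paro semanas dias out) := by unfold Spec_calcular_dias_con_paro; infer_instance

-- ===== CLAIM (what is proved, stated in full; the proofs are below) =====
def Claim_equal_calcular_dias_con_paro : Prop := ∀ (semanas : List Bool) (dias : Int), Dom_calcular_dias_con_paro semanas dias → Spec_calcular_dias_con_paro semanas dias (calcular_dias_con_paro semanas dias)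

-- ===== LEMMAS AND PROOFS =====

-- A's per-week inner loop, as a Nat count over the 5 weekday offsets.
theorem pv_week (xs : List Bool) (i : Nat) :
    List.countP (fun J => decide (PySem.List.pyGetD xs ((i : Int) * 7 + J) false = true)) [0, 1, 2, 3, 4]
      = (List.range 5).countP (fun j => xs.getD (7 * i + j) false) := by
  have key : ∀ (j : Nat), PySem.List.pyGetD xs ((i : Int) * 7 + (j : Int)) false = xs.getD (7 * i + j) false := by
    intro j
    rw [PySem.List.pyGetD_of_nonneg _ _ (by positivity)]
    congr 1
    omega
  have k0 := key 0; have k1 := key 1; have k2 := key 2; have k3 := key 3; have k4 := key 4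
  norm_num at k0 k1 k2 k3 k4
  have h5 : List.range 5 = [0, 1, 2, 3, 4] := by decide
  rw [h5]
  simp [List.countP, List.countP.go, k0, k1, k2, k3, k4]

-- The sum over weeks of the 5-weekday counts equals the flat count over the complete weeks.
theorem pv_key (xs : List Bool) (w : Nat) :
    (((List.range w).map (fun i => (((List.range 5).countP (fun j => xs.getD (7 * i + j) false) : Nat) : Int))).sum)
      = (((List.range (7 * w)).countP (fun k => decide (k % 7 < 5) && xs.getD k false) : Nat) : Int) := by
  induction w with
  | zero => simp
  | succ w ih =>
    have h5 : List.range 5 = [0, 1, 2, 3, 4] := by decide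
    have h7 : List.range 7 = [0, 1, 2, 3, 4, 5, 6] := by decide
    rw [h5] at ih ⊢
    rw [List.range_succ, show 7 * (w + 1) = 7 * w + 7 from by ring, List.range_add, h7]
    rw [List.map_append, List.sum_append, List.countP_append]
    push_cast
    rw [ih]
    have hm : ∀ j : Nat, (7 * w + j) % 7 = j % 7 := fun j => by omega
    simp [List.countP, List.countP.go, hm]

theorem calcular_dias_con_paro_spec : Claim_equal_calcular_dias_con_paro := by
  intro semanas dias _
  unfold Spec_calcular_dias_con_paro calcular_dias_con_paro calcular_dias_con_paro_alt
  dsimp only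
  have hfd : PySem.Int.floordiv ((semanas.length : Nat) : Int) 7 = ((semanas.length / 7 : Nat) : Int) := by
    exact_mod_cast PySem.Int.floordiv_natCast semanas.length 7
  have h5 : PySem.List.pyRange 0 5 = [0, 1, 2, 3, 4] := by decide
  -- A side
  rw [hfd, PySem.List.pyRange_zero_natCast, List.foldl_map, h5]
  simp only [PySem.List.foldl_ite_add_one, PySem.List.foldl_add]
  -- B side (its fold was already turned into a countP by the same foldl_ite_add_one step)
  rw [PySem.List.enumerate_eq_map_pyRange semanas false, List.countP_map]
  simp only [PySem.List.len_eq]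
  rw [PySem.List.pyRange_zero_natCast, List.countP_map]
  simp only [Function.comp_def]
  simp only [pv_week, pv_key]
  -- remaining: the flat count over range n with the idx<limit guard equals the count over 7*(n/7)
  set m := semanas.length / 7 with hmdef
  have hB : (List.range semanas.length).countP
        (fun x : Nat => decide ((x : Int) < (m : Int) * 7 ∧ PySem.Int.mod (x : Int) 7 < 5 ∧ PySem.List.pyGetD semanas (x : Int) false = true))
      = (List.range (7 * m)).countP (fun k => decide (k % 7 < 5) && semanas.getD k false) := by
    have hsplit : semanas.length = 7 * m + semanas.length % 7 := by
      rw [hmdef]; omega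
    rw [hsplit, List.range_add, List.countP_append, List.countP_map]
    have h2 : (List.range (semanas.length % 7)).countP
        ((fun x : Nat => decide ((x : Int) < (m : Int) * 7 ∧ PySem.Int.mod (x : Int) 7 < 5 ∧ PySem.List.pyGetD semanas (x : Int) false = true)) ∘ (fun x => 7 * m + x)) = 0 := by
      rw [List.countP_eq_zero]
      intro x _
      simp only [Function.comp_apply, decide_eq_true_eq, not_and]
      intro h
      exfalso
      push_cast at h
      omega
    rw [h2, Nat.add_zero]
    apply List.countP_congr
    intro k hk
    simp only [List.mem_range] at hk
    rw [PySem.Int.mod_eq_emod_of_pos (by norm_num : (0:Int) < 7)]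
    simp only [decide_eq_true_eq, Bool.and_eq_true]
    constructor
    · rintro ⟨-, h2, h3⟩
      refine ⟨by omega, by simpa [PySem.List.pyGetD_natCast] using h3⟩
    · rintro ⟨h2, h3⟩
      refine ⟨by omega, by omega, by simpa [PySem.List.pyGetD_natCast] using h3⟩
  rw [hB]
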